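-- pv_equiv track=rewrite | github.com/abdullShah/Python_2sem | лаба_5/zash_2/main.py | get_points
-- ===== SOURCE A (Python) =====
-- def get_points(arr):
--     new_arr = []
--
--     cur_ind = 0
--     is_end = False
--     while not is_end:
--         if cur_ind < len(arr):
--             while cur_ind < len(arr) and arr[cur_ind] is None:
--                 cur_ind += 1
--
--             if cur_ind == len(arr) and arr[cur_ind - 1] is None:
--                 is_end = True
--             if not is_end:
--                 new_arr.append(arr[cur_ind])
--                 arr[cur_ind] = None
--                 cur_ind += 4
--         else:
--             cur_ind = 0
--     new_arr.append(new_arr[0])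
--
--     return new_arr
-- ===== SOURCE B (Python) =====
-- def get_points(arr):
--     n = len(arr)
--     alive = [(i, x) for i, x in enumerate(arr) if x is not None]
--     out = []
--     while True:
--         cur = 0
--         rest = []
--         for i, x in alive:
--             if i >= cur:
--                 out.append(x)
--                 cur = i + 4
--             else:
--                 rest.append((i, x))
--         if cur < n:
--             break
--         alive = rest
--     out.append(out[0])
--     return out
-- ===== Notes on version B (the rewrite author's own statement) =====
-- stated objective: alternative
-- what changed: A repeatedly walks the array cell by cell, skipping the None holes it punched and resetting the cursor past the end; B never touches dead cells: it builds the (index, value) list of alive elements once and then does repeated greedy one-pass sweeps over that shrinking list, splitting each sweep into picked values and survivors.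
-- outside the precondition, e.g. on get_points([None, None]): A raises IndexError, B raises IndexError
import Mathlib
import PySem

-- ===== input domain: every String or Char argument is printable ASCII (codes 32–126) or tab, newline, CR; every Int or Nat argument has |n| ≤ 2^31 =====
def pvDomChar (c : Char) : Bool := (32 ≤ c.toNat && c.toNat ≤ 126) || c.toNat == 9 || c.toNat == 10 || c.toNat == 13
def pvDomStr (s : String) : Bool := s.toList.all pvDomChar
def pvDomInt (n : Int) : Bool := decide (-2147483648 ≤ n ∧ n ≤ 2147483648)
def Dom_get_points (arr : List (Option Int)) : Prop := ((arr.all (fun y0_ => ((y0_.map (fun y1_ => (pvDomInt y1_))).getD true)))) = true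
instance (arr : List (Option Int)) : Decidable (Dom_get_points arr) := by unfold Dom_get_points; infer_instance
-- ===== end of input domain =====

-- B replaces A's cell-by-cell None-skipping over the mutated array by repeated one-pass greedy
-- sweeps over a shrinking list of (index, value) pairs of the still-alive elements (alternative
-- decomposition; return-value equivalence only: A additionally mutates its argument in place).

-- ===== PORT A =====
-- inner `while cur_ind < len(arr) and arr[cur_ind] is None: cur_ind += 1`
def skipNones (arr : List (Option Int)) (cur : Nat) : Nat :=
  if h : cur < arr.length ∧ arr.getD cur none = none then skipNones arr (cur + 1) else cur
termination_by arr.length - cur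
decreasing_by omega

-- the outer `while not is_end` loop; the fuel only makes it total (Python diverges on empty arr);
-- the `| none => acc` branch is unreachable (Python would raise IndexError there)
def aLoop : Nat → List (Option Int) → Nat → List Int → List Int
  | 0, _, _, acc => acc
  | f + 1, arr, cur, acc =>
    if cur < arr.length then
      if skipNones arr cur = arr.length ∧ arr.getD (skipNones arr cur - 1) none = none then
        acc
      else
        match arr.getD (skipNones arr cur) none with
        | some v => aLoop f (arr.set (skipNones arr cur) none) (skipNones arr cur + 4) (acc ++ [v])
        | none => acc
    else
      aLoop f arr 0 acc

-- `new_arr.append(new_arr...)`: on an empty result Python raises IndexError (excluded by Pre_)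
def get_points (arr : List (Option Int)) : List Int :=
  match aLoop (2 * arr.length + 2) arr 0 [] with
  | [] => []
  | h :: t => (h :: t) ++ [h]

-- ===== PORT B =====
-- `alive = [(i, x) for i, x in enumerate(arr) if x is not None]`
def aliveAux : List (Option Int) → Nat → List (Nat × Int)
  | [], _ => []
  | none :: t, i => aliveAux t (i + 1)
  | some x :: t, i => (i, x) :: aliveAux t (i + 1)

-- one sweep (the `for i, x in alive` loop): returns (picked values, rest, final cur)
def pass1 : List (Nat × Int) → Nat → List Int × List (Nat × Int) × Nat
  | [], cur => ([], [], cur)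
  | (i, x) :: t, cur =>
    if cur ≤ i then
      let r := pass1 t (i + 4)
      (x :: r.1, r.2.1, r.2.2)
    else
      let r := pass1 t cur
      (r.1, (i, x) :: r.2.1, r.2.2)

-- the `while True` loop; the fuel only makes it total (Python B diverges on empty arr)
def bLoop : Nat → List (Nat × Int) → Nat → List Int → List Int
  | 0, _, _, acc => acc
  | f + 1, alive, n, acc =>
    let r := pass1 alive 0
    if r.2.2 < n then acc ++ r.1 else bLoop f r.2.1 n (acc ++ r.1)

-- appending the first picked element again: on an empty result Python raises IndexError (excluded by Pre_)
def get_points_alt (arr : List (Option Int)) : List Int :=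
  match bLoop (arr.length + 1) (aliveAux arr 0) arr.length [] with
  | [] => []
  | h :: t => (h :: t) ++ [h]

-- ===== PRECONDITION & SPEC =====
-- Pre_ excludes the empty list, on which Python A loops forever, and nonempty all-None lists,
-- on which Python A raises IndexError reading the first picked element (Python B raises there too).
def Pre_get_points (arr : List (Option Int)) : Prop := arr ≠ [] ∧ ∃ x ∈ arr, x ≠ none
instance (arr : List (Option Int)) : Decidable (Pre_get_points arr) := by unfold Pre_get_points; infer_instance
def pvWitness_get_points : List (Option Int) := [some 1, none, some 2, some 3]

def Spec_get_points (arr : List (Option Int)) (out : List Int) : Prop := out = get_points_alt arr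
instance (arr : List (Option Int)) (out : List Int) : Decidable (Spec_get_points arr out) := by unfold Spec_get_points; infer_instance

-- ===== CLAIM (what is proved, stated in full; the proofs are below) =====
def Claim_equal_get_points : Prop := ∀ (arr : List (Option Int)), Dom_get_points arr → Pre_get_points arr → Spec_get_points arr (get_points arr)

-- ===== LEMMAS AND PROOFS =====

-- alive-list slices of the array: AL = alive pairs with index < t, AF = those with index ≥ t,
-- AB = those with index in [t, u)
def AL (arr : List (Option Int)) (t : Nat) : List (Nat × Int) := aliveAux (arr.take t) 0
def AF (arr : List (Option Int)) (t : Nat) : List (Nat × Int) := aliveAux (arr.drop t) t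
def AB (arr : List (Option Int)) (t u : Nat) : List (Nat × Int) := aliveAux ((arr.drop t).take (u - t)) t

theorem aliveAux_append (a b : List (Option Int)) (i : Nat) :
    aliveAux (a ++ b) i = aliveAux a i ++ aliveAux b (i + a.length) := by
  induction a generalizing i with
  | nil => simp [aliveAux]
  | cons h t ih =>
    cases h <;> simp [aliveAux, ih] <;> ring_nf

theorem aliveAux_length_le (l : List (Option Int)) (i : Nat) : (aliveAux l i).length ≤ l.length := by
  induction l generalizing i with
  | nil => simp [aliveAux]
  | cons h t ih => cases h <;> simp [aliveAux] <;> exact Nat.le_trans (ih _) (by omega)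

theorem aliveAux_nil (l : List (Option Int)) (i : Nat) (h : ∀ y ∈ l, y = none) : aliveAux l i = [] := by
  induction l generalizing i with
  | nil => rfl
  | cons hd t ih =>
    have : hd = none := h hd (by simp)
    subst this
    exact ih _ (fun y hy => h y (by simp [hy]))

theorem mem_aliveAux_lt (l : List (Option Int)) (i : Nat) (p : Nat × Int) (h : p ∈ aliveAux l i) :
    p.1 < i + l.length := by
  induction l generalizing i with
  | nil => simp [aliveAux] at h
  | cons hd t ih =>
    cases hd with
    | none =>
      have := ih (i + 1) h
      simp at *; omega
    | some x =>
      simp [aliveAux] at h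
      rcases h with h | h
      · simp [h]
      · have := ih (i + 1) h; simp at *; omega

theorem AF_split (arr : List (Option Int)) (t u : Nat) (h : t ≤ u) :
    AF arr t = AB arr t u ++ AF arr u := by
  unfold AF AB
  conv_lhs => rw [← List.take_append_drop (u - t) (arr.drop t)]
  rw [aliveAux_append, List.drop_drop]
  have e : t + (u - t) = u := by omega
  rw [e]
  by_cases hu : u ≤ arr.length
  · have hlen : ((arr.drop t).take (u - t)).length = u - t := by
      simp [List.length_take, List.length_drop]; omega
    rw [hlen, e]
  · have h2 : arr.drop u = [] := List.drop_eq_nil_of_le (by omega)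
    rw [h2]
    simp [aliveAux]

theorem AL_split (arr : List (Option Int)) (t u : Nat) (h : t ≤ u) :
    AL arr u = AL arr t ++ AB arr t u := by
  unfold AL AB
  by_cases ht : t ≤ arr.length
  · have : u = t + (u - t) := by omega
    rw [this, List.take_add, aliveAux_append]
    have hl : (arr.take t).length = t := by simp; omega
    rw [hl]
    simp
  · have h1 : arr.take u = arr := List.take_of_length_le (by omega)
    have h2 : arr.take t = arr := List.take_of_length_le (by omega)
    have h3 : arr.drop t = [] := List.drop_eq_nil_of_le (by omega)
    rw [h1, h2, h3]
    simp [aliveAux]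

theorem alive_eq_AL_append_AF (arr : List (Option Int)) (t : Nat) :
    aliveAux arr 0 = AL arr t ++ AF arr t := by
  have h1 : AL arr t = AL arr 0 ++ AB arr 0 t := AL_split arr 0 t (Nat.zero_le t)
  have h2 : AF arr 0 = AB arr 0 t ++ AF arr t := AF_split arr 0 t (Nat.zero_le t)
  have h3 : AL arr 0 = [] := rfl
  have h4 : AF arr 0 = aliveAux arr 0 := by unfold AF; rw [List.drop_zero]
  rw [h1, h3, List.nil_append, ← h4, h2]

theorem skip_ge (arr : List (Option Int)) (cur : Nat) : cur ≤ skipNones arr cur := by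
  induction cur using skipNones.induct arr with
  | case1 cur h ih => rw [skipNones, dif_pos h]; omega
  | case2 cur h => rw [skipNones, dif_neg h]

theorem skip_le (arr : List (Option Int)) (cur : Nat) (h : cur ≤ arr.length) :
    skipNones arr cur ≤ arr.length := by
  induction cur using skipNones.induct arr with
  | case1 cur hc ih => rw [skipNones, dif_pos hc]; exact ih (by omega)
  | case2 cur hc => rw [skipNones, dif_neg hc]; exact h

theorem skip_none (arr : List (Option Int)) (cur k : Nat) (h1 : cur ≤ k)
    (h2 : k < skipNones arr cur) : arr.getD k none = none := by
  induction cur using skipNones.induct arr with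
  | case1 cur hc ih =>
    rw [skipNones, dif_pos hc] at h2
    rcases Nat.eq_or_lt_of_le h1 with he | hl
    · exact he ▸ hc.2
    · exact ih hl h2
  | case2 cur hc => rw [skipNones, dif_neg hc] at h2; omega

theorem skip_stop (arr : List (Option Int)) (cur : Nat) (h : skipNones arr cur < arr.length) :
    arr.getD (skipNones arr cur) none ≠ none := by
  induction cur using skipNones.induct arr with
  | case1 cur hc ih => rw [skipNones, dif_pos hc] at h ⊢; exact ih h
  | case2 cur hc =>
    rw [skipNones, dif_neg hc] at h ⊢
    intro hn; exact hc ⟨h, hn⟩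

theorem AF_of_skip (arr : List (Option Int)) (cur : Nat) :
    AF arr cur = AF arr (skipNones arr cur) := by
  induction cur using skipNones.induct arr with
  | case1 cur hc ih =>
    rw [skipNones, dif_pos hc, ← ih]
    unfold AF
    rw [List.drop_eq_getElem_cons hc.1]
    have : arr[cur] = none := by
      have := hc.2
      rwa [List.getD_eq_getElem?_getD, List.getElem?_eq_getElem hc.1] at this
    rw [this]
    rfl
  | case2 cur hc => rw [skipNones, dif_neg hc]

theorem AF_cons (arr : List (Option Int)) (j : Nat) (x : Int) (hj : j < arr.length)
    (hx : arr.getD j none = some x) : AF arr j = (j, x) :: AF arr (j + 1) := by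
  unfold AF
  rw [List.drop_eq_getElem_cons hj]
  have : arr[j] = some x := by
    rwa [List.getD_eq_getElem?_getD, List.getElem?_eq_getElem hj] at hx
  rw [this]
  rfl

theorem pass1_append_lt (w : List (Nat × Int)) (v : List (Nat × Int)) (cur : Nat)
    (h : ∀ p ∈ w, p.1 < cur) :
    pass1 (w ++ v) cur = ((pass1 v cur).1, w ++ (pass1 v cur).2.1, (pass1 v cur).2.2) := by
  induction w with
  | nil => simp
  | cons p t ih =>
    obtain ⟨i, x⟩ := p
    have hi : i < cur := h (i, x) (by simp)
    rw [List.cons_append]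
    show pass1 ((i, x) :: (t ++ v)) cur = _
    rw [pass1]
    rw [if_neg (by omega)]
    simp [ih (fun q hq => h q (List.mem_cons_of_mem _ hq))]

theorem pass1_length (l : List (Nat × Int)) (cur : Nat) :
    (pass1 l cur).1.length + (pass1 l cur).2.1.length = l.length := by
  induction l generalizing cur with
  | nil => simp [pass1]
  | cons p t ih =>
    obtain ⟨i, x⟩ := p
    rw [pass1]
    by_cases hcc : cur ≤ i
    · rw [if_pos hcc]; have := ih (i + 4); simp; omega
    · rw [if_neg hcc]; have := ih cur; simp; omega

theorem pass1_c_of_nil (l : List (Nat × Int)) (cur : Nat) (h : (pass1 l cur).1 = []) :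
    (pass1 l cur).2.2 = cur := by
  induction l generalizing cur with
  | nil => simp [pass1]
  | cons p t ih =>
    obtain ⟨i, x⟩ := p
    rw [pass1] at h ⊢
    by_cases hcc : cur ≤ i
    · rw [if_pos hcc] at h; simp at h
    · rw [if_neg hcc] at h ⊢; exact ih cur h

theorem bLoop_stable (f : Nat) : ∀ (g : Nat) (l : List (Nat × Int)) (n : Nat) (acc : List Int),
    0 < n → l.length < f → l.length < g → bLoop f l n acc = bLoop g l n acc := by
  induction f with
  | zero => intro g l n acc _ h _; omega
  | succ f ih =>
    intro g l n acc hn hf hg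
    cases g with
    | zero => omega
    | succ g =>
      rw [bLoop, bLoop]
      by_cases hc : (pass1 l 0).2.2 < n
      · simp [hc]
      · simp only [hc, if_false]
        have hp : (pass1 l 0).1 ≠ [] := by
          intro hnil
          have := pass1_c_of_nil l 0 hnil
          omega
        have hlen := pass1_length l 0
        have h1 : (pass1 l 0).1.length ≥ 1 := by
          cases h : (pass1 l 0).1 with
          | nil => exact absurd h hp
          | cons a b => simp
        exact ih g (pass1 l 0).2.1 n (acc ++ (pass1 l 0).1) hn (by omega) (by omega)

-- the main simulation lemma: A's loop state (arr, cur) against B's sweep decomposition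
theorem main_sim (f : Nat) : ∀ (arr : List (Option Int)) (cur : Nat) (acc : List Int),
    0 < arr.length →
    2 * (aliveAux arr 0).length + 1 ≤ f →
    (arr.length ≤ cur → 2 * (aliveAux arr 0).length + 2 ≤ f) →
    aLoop f arr cur acc =
      if (pass1 (AF arr cur) cur).2.2 < arr.length then acc ++ (pass1 (AF arr cur) cur).1
      else bLoop ((AL arr cur ++ (pass1 (AF arr cur) cur).2.1).length + 1)
             (AL arr cur ++ (pass1 (AF arr cur) cur).2.1) arr.length
             (acc ++ (pass1 (AF arr cur) cur).1) := by
  induction f with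
  | zero => intro arr cur acc hn h1 h2; omega
  | succ f ih =>
    intro arr cur acc hn h1 h2
    by_cases hcur : cur < arr.length
    · rw [aLoop, if_pos hcur]
      have hjge : cur ≤ skipNones arr cur := skip_ge arr cur
      have hjle : skipNones arr cur ≤ arr.length := skip_le arr cur (by omega)
      by_cases hjn : skipNones arr cur = arr.length
      · -- the sweep finds no alive element at or after cur: A stops
        have hlast : arr.getD (skipNones arr cur - 1) none = none := by
          rw [hjn]
          exact skip_none arr cur (arr.length - 1) (by omega) (by omega)
        rw [if_pos ⟨hjn, hlast⟩]
        have hAF : AF arr cur = [] := by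
          rw [AF_of_skip arr cur, hjn]
          unfold AF
          rw [List.drop_length]
          rfl
        rw [hAF]
        simp [pass1, hcur]
      · -- pick: A removes the first alive element at index j = skipNones arr cur
        have hjlt : skipNones arr cur < arr.length := by omega
        obtain ⟨x, hx⟩ : ∃ x, arr.getD (skipNones arr cur) none = some x := by
          cases hgd : arr.getD (skipNones arr cur) none with
          | none => exact absurd hgd (skip_stop arr cur hjlt)
          | some x => exact ⟨x, rfl⟩
        rw [if_neg (by rintro ⟨h, _⟩; omega), hx]
        set j := skipNones arr cur with hj
        set arr' := arr.set j none with harr'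
        have hlen' : arr'.length = arr.length := by simp [harr']
        have hAFskip : AF arr cur = (j, x) :: AF arr (j + 1) := by
          rw [AF_of_skip arr cur, ← hj, AF_cons arr j x hjlt hx]
        have hdrop4 : AF arr' (j + 4) = AF arr (j + 4) := by
          unfold AF; rw [harr', List.drop_set_of_lt (by omega)]
        have hmid : ∀ p ∈ AB arr (j + 1) (j + 4), p.1 < j + 4 := by
          intro p hp
          have h5 := mem_aliveAux_lt _ _ p hp
          have h6 : ((arr.drop (j + 1)).take (j + 4 - (j + 1))).length ≤ 3 := by
            simp [List.length_take]
          omega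
        have hAFv : AF arr (j + 1) = AB arr (j + 1) (j + 4) ++ AF arr (j + 4) :=
          AF_split arr (j + 1) (j + 4) (by omega)
        have hALj : AL arr' j = AL arr j := by
          unfold AL; rw [harr', List.take_set_of_le le_rfl]
        have hAF'j : AF arr' j = AF arr (j + 1) := by
          unfold AF
          rw [harr']
          rw [List.drop_eq_getElem_cons (by rw [List.length_set]; exact hjlt)]
          rw [List.getElem_set_self]
          rw [List.drop_set_of_lt (by omega)]
          rfl
        have hcount : (aliveAux arr' 0).length + 1 = (aliveAux arr 0).length := by
          rw [alive_eq_AL_append_AF arr' j, alive_eq_AL_append_AF arr j, hALj, hAF'j,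
            AF_cons arr j x hjlt hx]
          simp
          omega
        have ihres := ih arr' (j + 4) (acc ++ [x]) (by omega) (by omega) (fun _ => by omega)
        show aLoop f arr' (j + 4) (acc ++ [x]) = _
        rw [ihres]
        have hpass : pass1 (AF arr cur) cur =
            (x :: (pass1 (AF arr (j + 4)) (j + 4)).1,
             AB arr (j + 1) (j + 4) ++ (pass1 (AF arr (j + 4)) (j + 4)).2.1,
             (pass1 (AF arr (j + 4)) (j + 4)).2.2) := by
          rw [hAFskip, pass1, if_pos hjge, hAFv, pass1_append_lt _ _ _ hmid]
        have hABnil : AB arr' cur (j + 1) = [] := by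
          apply aliveAux_nil
          intro y hy
          obtain ⟨m, hm, hym⟩ := List.getElem_of_mem hy
          rw [List.getElem_take, List.getElem_drop] at hym
          have hm' : m < j + 1 - cur := by
            simp [List.length_take, List.length_drop, hlen'] at hm; omega
          have hcm : cur + m < arr.length := by omega
          rw [← hym]
          simp only [harr', List.getElem_set]
          by_cases he : j = cur + m
          · simp [he]
          · rw [if_neg he]
            have hnn := skip_none arr cur (cur + m) (by omega) (by rw [← hj]; omega)
            rwa [List.getD_eq_getElem?_getD, List.getElem?_eq_getElem hcm] at hnn
        have hABmid : AB arr' (j + 1) (j + 4) = AB arr (j + 1) (j + 4) := by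
          unfold AB; rw [harr', List.drop_set_of_lt (by omega)]
        have hALcur : AL arr' cur = AL arr cur := by
          unfold AL; rw [harr', List.take_set_of_le (by omega)]
        have hALeq : AL arr' (j + 4) = AL arr cur ++ AB arr (j + 1) (j + 4) := by
          rw [AL_split arr' (j + 1) (j + 4) (by omega), AL_split arr' cur (j + 1) (by omega),
            hABnil, hABmid, hALcur]
          simp
        rw [hpass, hdrop4, hALeq, hlen']
        by_cases hcone : (pass1 (AF arr (j + 4)) (j + 4)).2.2 < arr.length
        · simp [hcone]
        · simp only [hcone, if_false]
          congr 1 <;> simp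
    · -- cur past the end: A resets cur to 0
      rw [aLoop, if_neg hcur]
      have hfuel : 2 * (aliveAux arr 0).length + 2 ≤ f + 1 := h2 (by omega)
      rw [ih arr 0 acc hn (by omega) (fun hh => absurd hn (by omega))]
      have hAFcur : AF arr cur = [] := by
        unfold AF; rw [List.drop_eq_nil_of_le (by omega)]; rfl
      have hALfull : AL arr cur = aliveAux arr 0 := by
        unfold AL; rw [List.take_of_length_le (by omega)]
      have hAF0 : AF arr 0 = aliveAux arr 0 := by unfold AF; rw [List.drop_zero]
      have hAL0 : AL arr 0 = ([] : List (Nat × Int)) := rfl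
      have hrhs : (if (pass1 (AF arr cur) cur).2.2 < arr.length then acc ++ (pass1 (AF arr cur) cur).1
          else bLoop ((AL arr cur ++ (pass1 (AF arr cur) cur).2.1).length + 1)
             (AL arr cur ++ (pass1 (AF arr cur) cur).2.1) arr.length
             (acc ++ (pass1 (AF arr cur) cur).1))
          = bLoop ((aliveAux arr 0).length + 1) (aliveAux arr 0) arr.length acc := by
        rw [hAFcur, hALfull]
        have hnil : pass1 ([] : List (Nat × Int)) cur = ([], [], cur) := rfl
        rw [hnil]
        simp only [List.append_nil]
        rw [if_neg (by omega)]
      rw [hAF0, hAL0, hrhs]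
      simp only [List.nil_append]
      have hstep : bLoop ((aliveAux arr 0).length + 1) (aliveAux arr 0) arr.length acc
          = if (pass1 (aliveAux arr 0) 0).2.2 < arr.length
            then acc ++ (pass1 (aliveAux arr 0) 0).1
            else bLoop (aliveAux arr 0).length (pass1 (aliveAux arr 0) 0).2.1 arr.length
              (acc ++ (pass1 (aliveAux arr 0) 0).1) := by
        rw [bLoop]
      rw [hstep]
      by_cases hc : (pass1 (aliveAux arr 0) 0).2.2 < arr.length
      · simp [hc]
      · simp only [hc, if_false]
        have hp : (pass1 (aliveAux arr 0) 0).1 ≠ [] := by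
          intro hnil
          have := pass1_c_of_nil (aliveAux arr 0) 0 hnil
          omega
        have hlen := pass1_length (aliveAux arr 0) 0
        have h3 : 1 ≤ (pass1 (aliveAux arr 0) 0).1.length := by
          cases hh : (pass1 (aliveAux arr 0) 0).1 with
          | nil => exact absurd hh hp
          | cons a b => simp
        exact bLoop_stable _ _ _ _ _ hn (by omega) (by omega)

-- ===== VERDICT (by name: the statement is the Claim_ definition above) =====
theorem get_points_spec : Claim_equal_get_points := by
  intro arr _ hpre
  unfold Spec_get_points get_points get_points_alt
  have hn : 0 < arr.length := List.length_pos_of_ne_nil hpre.1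
  have ha : (aliveAux arr 0).length ≤ arr.length := aliveAux_length_le arr 0
  have hmain := main_sim (2 * arr.length + 2) arr 0 [] hn (by omega) (fun h => by omega)
  have hAF0 : AF arr 0 = aliveAux arr 0 := by unfold AF; rw [List.drop_zero]
  have hAL0 : AL arr 0 = ([] : List (Nat × Int)) := rfl
  rw [hAF0, hAL0] at hmain
  simp only [List.nil_append] at hmain
  rw [hmain]
  have hb : bLoop (arr.length + 1) (aliveAux arr 0) arr.length [] =
      if (pass1 (aliveAux arr 0) 0).2.2 < arr.length then [] ++ (pass1 (aliveAux arr 0) 0).1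
      else bLoop arr.length (pass1 (aliveAux arr 0) 0).2.1 arr.length ([] ++ (pass1 (aliveAux arr 0) 0).1) := by
    rw [bLoop]
  rw [hb]
  simp only [List.nil_append]
  by_cases hc : (pass1 (aliveAux arr 0) 0).2.2 < arr.length
  · simp [hc]
  · simp only [hc, if_false]
    have hp : (pass1 (aliveAux arr 0) 0).1 ≠ [] := by
      intro hnil
      have := pass1_c_of_nil (aliveAux arr 0) 0 hnil
      omega
    have hlen := pass1_length (aliveAux arr 0) 0
    have h3 : 1 ≤ (pass1 (aliveAux arr 0) 0).1.length := by
      cases hh : (pass1 (aliveAux arr 0) 0).1 with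
      | nil => exact absurd hh hp
      | cons a b => simp
    have hst := bLoop_stable ((pass1 (aliveAux arr 0) 0).2.1.length + 1) arr.length
      (pass1 (aliveAux arr 0) 0).2.1 arr.length ((pass1 (aliveAux arr 0) 0).1) hn (by omega) (by omega)
    rw [hst]
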